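-- pv_equiv track=rewrite | github.com/jfrisancho/py-jaydebeapi-example | payloads/services/validation_service-c-v020.py | _is_valid_node_revisit
-- ===== SOURCE A (Python) =====
-- from typing import Dict, Any, List, Optional, Set, Tuple
--
-- def _is_valid_node_revisit(node_id: int, path_nodes: List[int]) -> bool:
--     """Check if revisiting a node is valid (e.g., in loops)."""
--     # Find all positions of this node
--     positions = [i for i, node in enumerate(path_nodes) if node == node_id]
--
--     if len(positions) <= 1:
--         return True
--
--     # For now, allow revisits only if they're not consecutive
--     # (which would indicate a loop or valid routing pattern)
--     for i in range(len(positions) - 1):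
--         if positions[i+1] - positions[i] == 1:
--             return False  # Consecutive duplicate
--
--     return True
-- ===== SOURCE B (Python) =====
-- from typing import List
--
-- def _is_valid_node_revisit(node_id: int, path_nodes: List[int]) -> bool:
--     """Check if revisiting a node is valid (e.g., in loops)."""
--     # One adjacent-pair scan: invalid iff the node appears twice in a row.
--     return not any(a == node_id and b == node_id
--                    for a, b in zip(path_nodes, path_nodes[1:]))
-- ===== Notes on version B (the rewrite author's own statement) =====
-- stated objective: simpler
-- what changed: Instead of materializing the list of occurrence positions and then scanning that index list for gaps of 1, B does a single adjacent-pair scan of path_nodes (zip with its tail) and reports invalid iff the node occurs at two consecutive positions.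
import Mathlib
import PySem

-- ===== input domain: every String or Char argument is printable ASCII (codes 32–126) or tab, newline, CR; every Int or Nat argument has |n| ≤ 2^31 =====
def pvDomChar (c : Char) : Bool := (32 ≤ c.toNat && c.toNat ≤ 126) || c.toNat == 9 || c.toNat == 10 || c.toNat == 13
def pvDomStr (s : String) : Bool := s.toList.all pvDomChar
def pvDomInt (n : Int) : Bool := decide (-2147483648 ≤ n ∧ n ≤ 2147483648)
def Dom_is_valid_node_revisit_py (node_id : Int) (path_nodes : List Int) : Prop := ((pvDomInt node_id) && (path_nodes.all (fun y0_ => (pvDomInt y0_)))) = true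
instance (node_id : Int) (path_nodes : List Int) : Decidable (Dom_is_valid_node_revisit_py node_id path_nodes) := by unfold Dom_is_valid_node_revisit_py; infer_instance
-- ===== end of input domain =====

-- B replaces A's positions-index pass plus gap scan with one adjacent-pair scan of the input (simpler).


-- ===== PORT A =====
-- the 'for i in range(len(positions)-1): if positions[i+1]-positions[i]==1: return False' loop
def pvLoopA (ps : List Int) : List Int → Bool
  | [] => true
  | i :: rest =>
      if PySem.List.pyGetD ps (i + 1) 0 - PySem.List.pyGetD ps i 0 == 1 then false
      else pvLoopA ps rest

def is_valid_node_revisit_py (node_id : Int) (path_nodes : List Int) : Bool :=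
  let positions : List Int :=
    ((PySem.List.enumerate path_nodes 0).filter (fun p => p.2 == node_id)).map (fun p => p.1)
  if positions.length ≤ 1 then true
  else pvLoopA positions (PySem.List.pyRange 0 ((positions.length : Int) - 1) 1)

-- ===== PORT B =====
def is_valid_node_revisit_py_alt (node_id : Int) (path_nodes : List Int) : Bool :=
  !((path_nodes.zip path_nodes.tail).any (fun p => p.1 == node_id && p.2 == node_id))

-- ===== PRECONDITION & SPEC =====
def Spec_is_valid_node_revisit_py (node_id : Int) (path_nodes : List Int) (out : Bool) : Prop := out = is_valid_node_revisit_py_alt node_id path_nodes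
instance (node_id : Int) (path_nodes : List Int) (out : Bool) : Decidable (Spec_is_valid_node_revisit_py node_id path_nodes out) := by unfold Spec_is_valid_node_revisit_py; infer_instance

-- ===== CLAIM (what is proved, stated in full; the proofs are below) =====
def Claim_equal_is_valid_node_revisit_py : Prop := ∀ (node_id : Int) (path_nodes : List Int), Dom_is_valid_node_revisit_py node_id path_nodes → Spec_is_valid_node_revisit_py node_id path_nodes (is_valid_node_revisit_py node_id path_nodes)

-- ===== LEMMAS AND PROOFS =====

-- A's positions list, with an arbitrary enumerate start (for induction)
def pvPos (node_id : Int) (s : Int) (l : List Int) : List Int :=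
  ((PySem.List.enumerate l s).filter (fun p => p.2 == node_id)).map (fun p => p.1)

-- adjacent-gap-1 check on a positions list, as structural recursion
def pvAdj : List Int → Bool
  | a :: b :: t => (b - a == 1) || pvAdj (b :: t)
  | _ => false

theorem pvPos_cons (node_id s : Int) (x : Int) (l : List Int) :
    pvPos node_id s (x :: l) =
      (if x == node_id then [s] else []) ++ pvPos node_id (s + 1) l := by
  by_cases h : x == node_id <;>
    simp [pvPos, PySem.List.enumerate_cons, h]

theorem pvPos_mem_le (node_id s : Int) (l : List Int) (a : Int) (h : a ∈ pvPos node_id s l) :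
    s ≤ a := by
  simp only [pvPos, List.mem_map, List.mem_filter] at h
  obtain ⟨p, ⟨hp, _⟩, rfl⟩ := h
  rw [PySem.List.mem_enumerate_iff] at hp
  obtain ⟨k, hk, rfl⟩ := hp
  omega

-- dropping an isolated leading position does not change the gap check
theorem pvAdj_cons_far (s : Int) (ps : List Int) (h : ∀ a ∈ ps, s + 2 ≤ a) :
    pvAdj (s :: ps) = pvAdj ps := by
  cases ps with
  | nil => simp [pvAdj]
  | cons c r =>
      have hc : s + 2 ≤ c := h c (by simp)
      simp [pvAdj]
      intro hcs
      omega

theorem pvAdj_pos_eq_any (node_id : Int) (l : List Int) (s : Int) :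
    pvAdj (pvPos node_id s l) =
      (l.zip l.tail).any (fun p => p.1 == node_id && p.2 == node_id) := by
  induction l generalizing s with
  | nil => simp [pvPos, PySem.List.enumerate, pvAdj]
  | cons x l ih =>
      cases l with
      | nil =>
          rw [pvPos_cons]
          split_ifs <;> simp [pvPos, PySem.List.enumerate, pvAdj]
      | cons y t =>
          rw [pvPos_cons]
          by_cases hx : x = node_id
          · by_cases hy : y = node_id
            · rw [pvPos_cons]
              simp [hx, hy, pvAdj]
            · have hpos : pvPos node_id (s + 1) (y :: t) = pvPos node_id (s + 1 + 1) t := by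
                rw [pvPos_cons]; simp [hy]
              have hfar : pvAdj (s :: pvPos node_id (s + 1) (y :: t)) =
                  pvAdj (pvPos node_id (s + 1) (y :: t)) := by
                rw [hpos]
                exact pvAdj_cons_far s _ (fun a ha => by
                  have := pvPos_mem_le node_id (s + 1 + 1) t a ha; omega)
              simp only [hx, beq_self_eq_true, if_true, List.singleton_append]
              rw [hfar, ih (s + 1)]
              simp [hy]
          · simp only [beq_iff_eq, hx, if_false, List.nil_append]
            rw [ih (s + 1)]
            simp [hx]

-- A's range loop over positions is the structural gap check
theorem pvLoopA_shift (x : Int) (ps : List Int) (r : List Nat) :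
    pvLoopA (x :: ps) (r.map (fun (k : Nat) => ((k + 1 : Nat) : Int))) =
      pvLoopA ps (r.map (fun (k : Nat) => (k : Int))) := by
  induction r with
  | nil => rfl
  | cons k r ih =>
      simp only [List.map_cons, pvLoopA]
      rw [show ((k + 1 : Nat) : Int) + 1 = ((k + 2 : Nat) : Int) by push_cast; ring,
          show ((k : Nat) : Int) + 1 = ((k + 1 : Nat) : Int) by push_cast; ring]
      simp only [PySem.List.pyGetD_natCast, List.getD_cons_succ]
      rw [ih]

theorem pvLoopA_range (ps : List Int) :
    pvLoopA ps ((List.range (ps.length - 1)).map (fun (k : Nat) => (k : Int))) = !pvAdj ps := by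
  induction ps with
  | nil => simp [pvLoopA, pvAdj]
  | cons a ps ih =>
      cases ps with
      | nil => simp [pvLoopA, pvAdj]
      | cons b t =>
          have hlen : (a :: b :: t).length - 1 = t.length + 1 := by simp
          rw [hlen, List.range_succ_eq_map, List.map_cons, List.map_map]
          simp only [pvLoopA]
          rw [show ((0 : Nat) : Int) + 1 = ((1 : Nat) : Int) by norm_num]
          simp only [PySem.List.pyGetD_natCast]
          have hmap : (List.range t.length).map ((fun (k : Nat) => (k : Int)) ∘ Nat.succ) =
              (List.range t.length).map (fun (k : Nat) => ((k + 1 : Nat) : Int)) := by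
            simp [Function.comp]
          by_cases hgap : b - a = 1
          · simp [pvAdj, hgap]
          · have hb : (b - a == 1) = false := by simp [hgap]
            simp only [List.getD, List.getElem?_cons_zero, List.getElem?_cons_succ,
              Option.getD_some, hb, Bool.false_eq_true]
            rw [hmap, pvLoopA_shift]
            have hlen2 : t.length = (b :: t).length - 1 := by simp
            rw [hlen2, ih]
            simp [pvAdj, hb]

theorem pvAdj_short (ps : List Int) (h : ps.length ≤ 1) : pvAdj ps = false := by
  cases ps with
  | nil => rfl
  | cons a ps => cases ps with
    | nil => rfl
    | cons b t => simp at h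

-- ===== VERDICT (by name: the statement is the Claim_ definition above) =====
theorem is_valid_node_revisit_py_spec : Claim_equal_is_valid_node_revisit_py := by
  intro node_id l _
  unfold Spec_is_valid_node_revisit_py is_valid_node_revisit_py is_valid_node_revisit_py_alt
  have hpos : ((PySem.List.enumerate l 0).filter (fun p => p.2 == node_id)).map (fun p => p.1)
      = pvPos node_id 0 l := rfl
  simp only [hpos]
  rw [← pvAdj_pos_eq_any node_id l 0]
  set ps := pvPos node_id 0 l with hps
  by_cases hlen : ps.length ≤ 1
  · simp [hlen, pvAdj_short ps hlen]
  · simp only [hlen, if_false]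
    have hcast : ((ps.length : Int) - 1) = ((ps.length - 1 : Nat) : Int) := by
      push_cast [Nat.cast_sub (by omega : 1 ≤ ps.length)]; ring
    rw [hcast, PySem.List.pyRange_zero_natCast, pvLoopA_range]
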